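-- pv_equiv track=rewrite | github.com/cms02snu/Algorithm | atcoder/240413_1.py | solution
-- ===== SOURCE A (Python) =====
-- def solution(S):
--     temp = {}
--
--     for s in S:
--         if s not in temp:
--             temp[s] = 1
--         else:
--             temp[s] += 1
--
--     result = {}
--
--     for s in temp:
--         n = temp[s]
--         if n not in result:
--             result[n] = 1
--         else:
--             result[n] += 1
--
--     for s in result:
--         if result[s] not in [0,2]:
--             return 'No'
--
--     return 'Yes'
-- ===== SOURCE B (Python) =====
-- def solution(S):
--     cnt = {}
--     for ch in S:
--         cnt[ch] = cnt.get(ch, 0) + 1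
--     counts = sorted(cnt.values())
--
--     def check(lst):
--         if not lst:
--             return 'Yes'
--         x = lst[0]
--         j = 1
--         while j < len(lst) and lst[j] == x:
--             j += 1
--         if j != 2:
--             return 'No'
--         return check(lst[j:])
--
--     return check(counts)
-- ===== Notes on version B (the rewrite author's own statement) =====
-- stated objective: alternative
-- what changed: Replaces A's second frequency-of-frequencies dict and its membership test against 0 and 2 by sorting the character counts and recursively scanning runs of equal consecutive values, requiring every run to have length exactly 2 (counts are nonzero, so the zero case never occurs).
import Mathlib
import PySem

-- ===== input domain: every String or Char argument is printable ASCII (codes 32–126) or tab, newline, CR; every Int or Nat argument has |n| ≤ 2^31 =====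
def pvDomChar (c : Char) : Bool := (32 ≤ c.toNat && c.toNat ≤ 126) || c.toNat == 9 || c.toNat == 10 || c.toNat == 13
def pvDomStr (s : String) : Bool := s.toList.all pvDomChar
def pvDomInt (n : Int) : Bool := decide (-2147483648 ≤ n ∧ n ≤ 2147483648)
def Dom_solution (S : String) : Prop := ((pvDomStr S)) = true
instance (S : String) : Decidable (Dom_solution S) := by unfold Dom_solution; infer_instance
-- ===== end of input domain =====

-- B sorts the character counts and scans runs of equal consecutive values, demanding each
-- run have length exactly 2, instead of A's second frequency-of-frequencies dict (alternative; no speed claim).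

-- ===== PORT A =====
-- the early-return loop 'for s in result: if result[s] not in [0,2]: return "No"'
def checkLoopA (ks : List Int) (r : PySem.Dict Int Int) : String :=
  match ks with
  | [] => "Yes"
  | k :: rest => if !(r.getD k 0 == 0 || r.getD k 0 == 2) then "No" else checkLoopA rest r

def solution (S : String) : String :=
  let temp : PySem.Dict Char Int :=
    S.toList.foldl
      (fun d c => if d.contains c = false then d.insert c 1 else d.insert c (d.getD c 0 + 1))
      PySem.Dict.empty
  let result : PySem.Dict Int Int :=
    temp.keys.foldl
      (fun d k =>
        let n := temp.getD k 0
        if d.contains n = false then d.insert n 1 else d.insert n (d.getD n 0 + 1))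
      PySem.Dict.empty
  checkLoopA result.keys result

-- ===== PORT B =====
-- Source B's inner while loop counts the run of lst[0] at the front (j = 1 + length of that run
-- within lst[1:]), then recurses on lst[j:]; ported via takeWhile/dropWhile, which split the
-- list at exactly that index.
def runCheck (l : List Int) : String :=
  match l with
  | [] => "Yes"
  | x :: rest =>
    let j := 1 + (rest.takeWhile (fun y => y == x)).length
    if j ≠ 2 then "No" else runCheck (rest.dropWhile (fun y => y == x))
termination_by l.length
decreasing_by
  simp only [List.length_cons]
  exact Nat.lt_succ_of_le (List.length_dropWhile_le _ _)

def solution_alt (S : String) : String :=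
  let cnt : PySem.Dict Char Int :=
    S.toList.foldl (fun d c => d.insert c (d.getD c 0 + 1)) PySem.Dict.empty
  let counts := PySem.List.sorted cnt.values (fun x => x) false
  runCheck counts

-- ===== PRECONDITION & SPEC =====
def Spec_solution (S : String) (out : String) : Prop := out = solution_alt S
instance (S : String) (out : String) : Decidable (Spec_solution S out) := by unfold Spec_solution; infer_instance

-- ===== CLAIM (what is proved, stated in full; the proofs are below) =====
def Claim_equal_solution : Prop := ∀ (S : String), Dom_solution S → Spec_solution S (solution S)

-- ===== LEMMAS AND PROOFS =====

-- A's 'if key absent insert 1 else increment' body is the pure counter-increment body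
theorem insertBranch_eq {κ : Type} [BEq κ] [LawfulBEq κ] :
    (fun (d : PySem.Dict κ Int) c => if d.contains c = false then d.insert c 1 else d.insert c (d.getD c 0 + 1))
      = fun (d : PySem.Dict κ Int) c => d.insert c (d.getD c 0 + 1) := by
  funext d c
  by_cases h : d.contains c
  · simp [h]
  · simp only [Bool.not_eq_true] at h
    rw [PySem.Dict.getD_of_not_contains d 0 h]
    simp [h]

-- A's second loop is the counter of the list of character counts
theorem loop2_eq (t : PySem.Dict Char Int) :
    t.keys.foldl
      (fun (d : PySem.Dict Int Int) k =>
        let n := t.getD k 0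
        if d.contains n = false then d.insert n 1 else d.insert n (d.getD n 0 + 1))
      PySem.Dict.empty
    = PySem.Dict.counter (t.keys.map fun k => t.getD k 0) := by
  rw [← PySem.Dict.foldl_insert_getD_add_one_eq_counter, List.foldl_map]
  congr 1
  funext d k
  by_cases h : d.contains (t.getD k 0)
  · simp [h]
  · simp only [Bool.not_eq_true] at h
    rw [PySem.Dict.getD_of_not_contains d 0 h]
    simp [h]

theorem checkLoopA_eq (ks : List Int) (r : PySem.Dict Int Int) :
    checkLoopA ks r = if ks.all (fun k => r.getD k 0 == 0 || r.getD k 0 == 2) then "Yes" else "No" := by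
  induction ks with
  | nil => simp [checkLoopA]
  | cons k rest ih =>
    simp only [checkLoopA, List.all_cons, ih]
    by_cases h : (r.getD k 0 == 0 || r.getD k 0 == 2) = true
    · simp [h]
    · simp [h]

-- on a sorted list, the run scan returns "Yes" iff every element occurs exactly twice
theorem runCheck_sorted : ∀ (n : Nat) (l : List Int), l.length ≤ n → l.Pairwise (· ≤ ·) →
    runCheck l = if l.all (fun c => l.count c == 2) then "Yes" else "No" := by
  intro n
  induction n with
  | zero =>
    intro l hl _
    have : l = [] := List.eq_nil_of_length_eq_zero (Nat.le_zero.mp hl)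
    subst this; simp [runCheck]
  | succ n ih =>
    intro l hl hp
    match l with
    | [] => simp [runCheck]
    | x :: rest =>
      have hxrest : ∀ y ∈ rest, x ≤ y := (List.pairwise_cons.mp hp).1
      have hprest : rest.Pairwise (· ≤ ·) := (List.pairwise_cons.mp hp).2
      set tw := rest.takeWhile (fun y => y == x) with htw
      set dw := rest.dropWhile (fun y => y == x) with hdw
      have hsplit : rest = tw ++ dw := (List.takeWhile_append_dropWhile).symm
      have htwx : ∀ y ∈ tw, y = x := by
        intro y hy
        have := List.mem_takeWhile_imp hy
        exact beq_iff_eq.mp this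
      have hdwx : ∀ y ∈ dw, x < y := by
        intro y hy
        rcases hde : dw with _ | ⟨h0, t⟩
        · rw [hde] at hy; simp at hy
        · have hdrop : List.dropWhile (fun y => y == x) rest = h0 :: t := by
            rw [← hdw, hde]
          have hh0 : (h0 == x) = false := by
            have := List.head?_dropWhile_not (fun y => y == x) rest
            rw [hdrop] at this
            simpa using this
          have hh0x : x < h0 := by
            have hmem : h0 ∈ rest := by
              rw [hsplit, hde]; simp
            rcases lt_or_eq_of_le (hxrest h0 hmem) with h | h
            · exact h
            · rw [← h] at hh0; simp at hh0
          have hpdw : (h0 :: t).Pairwise (· ≤ ·) :=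
            List.Pairwise.sublist (by rw [← hdrop]; exact List.dropWhile_sublist _) hprest
          rw [hde] at hy
          rcases List.mem_cons.mp hy with h | h
          · exact h ▸ hh0x
          · exact lt_of_lt_of_le hh0x ((List.pairwise_cons.mp hpdw).1 y h)
      have hcx : (x :: rest).count x = tw.length + 1 := by
        have h1 : tw.count x = tw.length := List.count_eq_length.mpr (fun b hb => ((htwx b hb).symm ▸ rfl))
        have h2 : dw.count x = 0 := List.count_eq_zero.mpr (fun hmem => lt_irrefl x (hdwx x hmem))
        rw [List.count_cons_self, hsplit, List.count_append, h1, h2]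
      have hcy : ∀ y ∈ dw, (x :: rest).count y = dw.count y := by
        intro y hy
        have hyx : y ≠ x := ne_of_gt (hdwx y hy)
        have h1 : tw.count y = 0 := List.count_eq_zero.mpr (fun hmem => hyx (htwx y hmem))
        rw [List.count_cons_of_ne (Ne.symm hyx), hsplit, List.count_append, h1, Nat.zero_add]
      rw [runCheck]
      rw [← htw, ← hdw]
      by_cases hlen : tw.length = 1
      · -- run of length exactly 2
        have hdwlen : dw.length ≤ n := by
          have := congrArg List.length hsplit
          simp [List.length_append] at this
          simp [List.length_cons] at hl
          omega
        have hpdw : dw.Pairwise (· ≤ ·) := by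
          rw [hdw]; exact List.Pairwise.sublist (List.dropWhile_sublist _) hprest
        rw [if_neg (by omega), ih dw hdwlen hpdw]
        have hall : ((x :: rest).all (fun c => (x :: rest).count c == 2))
            = (dw.all (fun c => dw.count c == 2)) := by
          rw [Bool.eq_iff_iff]
          simp only [List.all_eq_true, beq_iff_eq]
          constructor
          · intro h y hy
            have := h y (by rw [hsplit]; exact List.mem_cons_of_mem _ (List.mem_append_right _ hy))
            rw [hcy y hy] at this
            exact this
          · intro h y hy
            rcases List.mem_cons.mp hy with h1 | h1
            · subst h1; rw [hcx, hlen]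
            · rw [hsplit] at h1
              rcases List.mem_append.mp h1 with h2 | h2
              · rw [htwx y h2, hcx, hlen]
              · rw [hcy y h2]; exact h y h2
        rw [hall]
      · -- run of length ≠ 2: x's count is wrong
        rw [if_pos (by omega)]
        have : ((x :: rest).all (fun c => (x :: rest).count c == 2)) = false := by
          apply List.all_eq_false.mpr
          exact ⟨x, List.mem_cons_self, by simp [hcx]; omega⟩
        rw [this]; simp

-- ===== VERDICT (by name: the statement is the Claim_ definition above) =====
theorem solution_spec : Claim_equal_solution := by
  intro S _
  unfold Spec_solution solution solution_alt
  simp only [insertBranch_eq, PySem.Dict.foldl_insert_getD_add_one_eq_counter, loop2_eq]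
  rw [← PySem.Dict.values_eq_map_keys _ (PySem.Dict.nodup_keys_counter S.toList) 0]
  set V := (PySem.Dict.counter S.toList).values with hV
  set L := PySem.List.sorted V (fun x => x) false with hL
  have hperm : L.Perm V := PySem.List.sorted_perm V _ _
  have hpw : L.Pairwise (· ≤ ·) := PySem.List.sorted_pairwise V (fun x => x)
  rw [checkLoopA_eq, PySem.Dict.keys_counter]
  rw [runCheck_sorted L.length L (le_refl _) hpw]
  have hcond : ((PySem.Set.ofList V).all
      (fun k => ((PySem.Dict.counter V).getD k 0 == 0 || (PySem.Dict.counter V).getD k 0 == 2)))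
      = (L.all (fun c => L.count c == 2)) := by
    rw [Bool.eq_iff_iff]
    simp only [List.all_eq_true, PySem.Set.mem_ofList, PySem.Dict.getD_counter,
               Bool.or_eq_true, beq_iff_eq]
    constructor
    · intro h c hc
      have hcV : c ∈ V := hperm.mem_iff.mp hc
      have hkc := h c hcV
      have hpos : 0 < V.count c := List.count_pos_iff.mpr hcV
      rw [hperm.count_eq]
      omega
    · intro h k hk
      have hkL : k ∈ L := hperm.mem_iff.mpr hk
      have hkc := h k hkL
      rw [hperm.count_eq] at hkc
      omega
  rw [hcond]
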